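-- pv_equiv track=rewrite | github.com/stuarttempleton/volt-chat | raw_parser.py | parse_redirection
-- ===== SOURCE A (Python) =====
-- def parse_redirection(cmd):
--     """
--     Detects > and >> outside quotes and parentheses.
--     Returns (base_cmd, target_file, append)
--     """
--     quote = None
--     escape = False
--     depth = 0
--
--     for i, ch in enumerate(cmd):
--         if escape:
--             escape = False
--             continue
--         if ch == "\\":
--             escape = True
--             continue
--         if ch in ("'", '"'):
--             if quote == ch:
--                 quote = None
--             elif not quote:
--                 quote = ch
--             continue
--         if ch == "(":
--             depth += 1
--         elif ch == ")" and depth > 0: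
--             depth -= 1
--         if not quote and depth == 0:
--             if cmd[i:i+2] == ">>":
--                 return cmd[:i].strip(), cmd[i+2:].strip(), True
--             elif ch == ">":
--                 return cmd[:i].strip(), cmd[i+1:].strip(), False
--     return cmd.strip(), None, False
-- ===== SOURCE B (Python) =====
-- def parse_redirection(cmd):
--     """
--     Detects > and >> outside quotes and parentheses.
--     Returns (base_cmd, target_file, append)
--     Two-pass version: first mark which positions are 'active' (unescaped,
--     unquoted, at paren depth 0), then scan for the first active '>'.
--     """
--     quote = None
--     escape = False
--     depth = 0
--     active = []
--     for ch in cmd: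
--         if escape:
--             escape = False
--             active.append(False)
--         elif ch == "\\":
--             escape = True
--             active.append(False)
--         elif ch in ("'", '"'):
--             if quote == ch:
--                 quote = None
--             elif not quote:
--                 quote = ch
--             active.append(False)
--         else:
--             if ch == "(":
--                 depth += 1
--             elif ch == ")" and depth > 0:
--                 depth -= 1
--             active.append(quote is None and depth == 0)
--     for i, (ok, ch) in enumerate(zip(active, cmd)):
--         if ok and ch == ">":
--             if cmd[i+1:i+2] == ">":
--                 return cmd[:i].strip(), cmd[i+2:].strip(), True
--             return cmd[:i].strip(), cmd[i+1:].strip(), False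
--     return cmd.strip(), None, False
-- ===== Notes on version B (the rewrite author's own statement) =====
-- stated objective: alternative
-- what changed: A's single loop with an early return at the first unquoted depth-0 redirection character is split into two passes: pass 1 runs the escape/quote/paren state machine once over the whole string recording a per-position boolean flag, pass 2 scans those flags for the first flagged redirection character and slices the command there.
import Mathlib
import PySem

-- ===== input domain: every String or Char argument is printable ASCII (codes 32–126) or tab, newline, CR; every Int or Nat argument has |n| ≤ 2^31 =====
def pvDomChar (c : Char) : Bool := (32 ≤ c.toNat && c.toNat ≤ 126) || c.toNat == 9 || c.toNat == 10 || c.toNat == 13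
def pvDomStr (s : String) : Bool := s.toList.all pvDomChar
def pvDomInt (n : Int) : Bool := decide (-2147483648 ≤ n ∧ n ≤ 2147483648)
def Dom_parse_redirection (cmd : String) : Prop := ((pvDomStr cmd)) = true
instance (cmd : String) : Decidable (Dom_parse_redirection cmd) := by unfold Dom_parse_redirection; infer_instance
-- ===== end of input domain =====

-- B replaces A's single loop with an early return by two passes (mark active positions, then scan
-- for the first active '>'); objective: alternative decomposition, same O(n) cost.

-- ===== PORT A =====
-- literal port of A's loop: state (quote, escape, depth), early return at the first
-- unquoted depth-0 '>' / '>>' (cmd[i:i+2] tested exactly as Python does)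
def pvA_go (cmd : List Char) (rest : List Char) (i : Nat) (quote : Option Char)
    (escape : Bool) (depth : Int) : String × Option String × Bool :=
  match rest with
  | [] => (String.ofList (PySem.Chars.strip cmd), none, false)
  | ch :: rs =>
    if escape then
      pvA_go cmd rs (i+1) quote false depth
    else if ch = '\\' then
      pvA_go cmd rs (i+1) quote true depth
    else if ch = '\'' ∨ ch = '"' then
      pvA_go cmd rs (i+1)
        (if quote = some ch then none else if quote = none then some ch else quote) escape depth
    else
      if quote = none ∧ (if ch = '(' then depth + 1
          else if ch = ')' ∧ depth > 0 then depth - 1 else depth) = 0 then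
        if PySem.List.slice cmd (some (i:Int)) (some ((i:Int)+2)) = ['>', '>'] then
          (String.ofList (PySem.Chars.strip (PySem.List.slice cmd none (some (i:Int)))),
           some (String.ofList (PySem.Chars.strip (PySem.List.slice cmd (some ((i:Int)+2)) none))),
           true)
        else if ch = '>' then
          (String.ofList (PySem.Chars.strip (PySem.List.slice cmd none (some (i:Int)))),
           some (String.ofList (PySem.Chars.strip (PySem.List.slice cmd (some ((i:Int)+1)) none))),
           false)
        else
          pvA_go cmd rs (i+1) quote escape
            (if ch = '(' then depth + 1
             else if ch = ')' ∧ depth > 0 then depth - 1 else depth)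
      else
        pvA_go cmd rs (i+1) quote escape
          (if ch = '(' then depth + 1
           else if ch = ')' ∧ depth > 0 then depth - 1 else depth)

def parse_redirection (cmd : String) : String × Option String × Bool :=
  pvA_go cmd.toList cmd.toList 0 none false 0

-- ===== PORT B =====
-- pass 1: the escape/quote/depth state machine, recording per character whether it is 'active'
def pvB_pass1 (rest : List Char) (quote : Option Char) (escape : Bool) (depth : Int) : List Bool :=
  match rest with
  | [] => []
  | ch :: rs =>
    if escape then false :: pvB_pass1 rs quote false depth
    else if ch = '\\' then false :: pvB_pass1 rs quote true depth
    else if ch = '\'' ∨ ch = '"' then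
      false :: pvB_pass1 rs
        (if quote = some ch then none else if quote = none then some ch else quote) escape depth
    else
      decide (quote = none ∧ (if ch = '(' then depth + 1
          else if ch = ')' ∧ depth > 0 then depth - 1 else depth) = 0) ::
        pvB_pass1 rs quote escape
          (if ch = '(' then depth + 1
           else if ch = ')' ∧ depth > 0 then depth - 1 else depth)

-- pass 2: scan zip(active, cmd) for the first active '>'
def pvB_pass2 (cmd : List Char) (pairs : List (Bool × Char)) (i : Nat) :
    String × Option String × Bool :=
  match pairs with
  | [] => (String.ofList (PySem.Chars.strip cmd), none, false)
  | (ok, ch) :: rs =>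
    if ok = true ∧ ch = '>' then
      if PySem.List.slice cmd (some ((i:Int)+1)) (some ((i:Int)+2)) = ['>'] then
        (String.ofList (PySem.Chars.strip (PySem.List.slice cmd none (some (i:Int)))),
         some (String.ofList (PySem.Chars.strip (PySem.List.slice cmd (some ((i:Int)+2)) none))),
         true)
      else
        (String.ofList (PySem.Chars.strip (PySem.List.slice cmd none (some (i:Int)))),
         some (String.ofList (PySem.Chars.strip (PySem.List.slice cmd (some ((i:Int)+1)) none))),
         false)
    else pvB_pass2 cmd rs (i+1)

def parse_redirection_alt (cmd : String) : String × Option String × Bool :=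
  pvB_pass2 cmd.toList ((pvB_pass1 cmd.toList none false 0).zip cmd.toList) 0

-- ===== PRECONDITION & SPEC =====
def Spec_parse_redirection (cmd : String) (out : String × Option String × Bool) : Prop := out = parse_redirection_alt cmd
instance (cmd : String) (out : String × Option String × Bool) : Decidable (Spec_parse_redirection cmd out) := by unfold Spec_parse_redirection; infer_instance

-- ===== CLAIM (what is proved, stated in full; the proofs are below) =====
def Claim_equal_parse_redirection : Prop := ∀ (cmd : String), Dom_parse_redirection cmd → Spec_parse_redirection cmd (parse_redirection cmd)

-- ===== LEMMAS AND PROOFS =====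

lemma pv_slice_take (cmd : List Char) (i k : Nat) :
    PySem.List.slice cmd (some (i:Int)) (some ((i:Int)+(k:Nat))) = (cmd.drop i).take k := by
  have := PySem.List.slice_natCast_add (xs := cmd) (j := i) (n := k)
  simpa using this

lemma pv_go_eq (cmd : List Char) : ∀ (rest : List Char) (i : Nat) (q : Option Char) (e : Bool) (d : Int),
    cmd.drop i = rest →
    pvA_go cmd rest i q e d = pvB_pass2 cmd ((pvB_pass1 rest q e d).zip rest) i := by
  intro rest
  induction rest with
  | nil =>
    intro i q e d _
    simp [pvA_go, pvB_pass1, pvB_pass2]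
  | cons ch rs ih =>
    intro i q e d h
    have hdrop : cmd.drop (i+1) = rs := by
      rw [← List.tail_drop, h]
      rfl
    have htake2 : PySem.List.slice cmd (some (i:Int)) (some ((i:Int)+2)) = ch :: rs.take 1 := by
      have := pv_slice_take cmd i 2
      rw [h] at this
      simpa using this
    have htake1 : PySem.List.slice cmd (some ((i:Int)+1)) (some ((i:Int)+2)) = rs.take 1 := by
      have := pv_slice_take cmd (i+1) 1
      rw [hdrop] at this
      have e2 : ((i+1:Nat):Int)+((1:Nat):Int) = (i:Int)+2 := by push_cast; ring
      rw [e2] at this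
      rw [show ((i+1:Nat):Int) = (i:Int)+1 by push_cast; ring] at this
      exact this
    by_cases he : e = true
    · subst he
      have hA : pvA_go cmd (ch::rs) i q true d = pvA_go cmd rs (i+1) q false d := by
        simp [pvA_go]
      have hB : pvB_pass2 cmd ((pvB_pass1 (ch::rs) q true d).zip (ch::rs)) i
          = pvB_pass2 cmd ((pvB_pass1 rs q false d).zip rs) (i+1) := by
        simp [pvB_pass1, pvB_pass2]
      rw [hA, hB]
      exact ih (i+1) q false d hdrop
    · have he' : e = false := by simpa using he
      subst he'
      by_cases hb : ch = '\\'
      · have hA : pvA_go cmd (ch::rs) i q false d = pvA_go cmd rs (i+1) q true d := by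
          simp [pvA_go, hb]
        have hB : pvB_pass2 cmd ((pvB_pass1 (ch::rs) q false d).zip (ch::rs)) i
            = pvB_pass2 cmd ((pvB_pass1 rs q true d).zip rs) (i+1) := by
          simp [pvB_pass1, pvB_pass2, hb]
        rw [hA, hB]
        exact ih (i+1) q true d hdrop
      · by_cases hq : ch = '\'' ∨ ch = '"'
        · have hA : pvA_go cmd (ch::rs) i q false d
              = pvA_go cmd rs (i+1) (if q = some ch then none else if q = none then some ch else q) false d := by
            simp [pvA_go, hb, hq]
          have hB : pvB_pass2 cmd ((pvB_pass1 (ch::rs) q false d).zip (ch::rs)) i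
              = pvB_pass2 cmd ((pvB_pass1 rs (if q = some ch then none else if q = none then some ch else q) false d).zip rs) (i+1) := by
            simp [pvB_pass1, pvB_pass2, hb, hq]
          rw [hA, hB]
          exact ih (i+1) (if q = some ch then none else if q = none then some ch else q) false d hdrop
        · by_cases hc : q = none ∧ (if ch = '(' then d + 1
              else if ch = ')' ∧ d > 0 then d - 1 else d) = 0
          · by_cases hgt : ch = '>'
            · subst hgt
              have hc' : q = none ∧ d = 0 := by simpa using hc
              by_cases ht1 : rs.take 1 = ['>']
              · have h2 : PySem.List.slice cmd (some (i:Int)) (some ((i:Int)+2)) = ['>', '>'] := by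
                  rw [htake2, ht1]
                have h1 : PySem.List.slice cmd (some ((i:Int)+1)) (some ((i:Int)+2)) = ['>'] := by
                  rw [htake1, ht1]
                have hA : pvA_go cmd ('>'::rs) i q false d
                    = (String.ofList (PySem.Chars.strip (PySem.List.slice cmd none (some (i:Int)))),
                       some (String.ofList (PySem.Chars.strip (PySem.List.slice cmd (some ((i:Int)+2)) none))), true) := by
                  simp [pvA_go, hc'.1, hc'.2, h2]
                have hB : pvB_pass2 cmd ((pvB_pass1 ('>'::rs) q false d).zip ('>'::rs)) i
                    = (String.ofList (PySem.Chars.strip (PySem.List.slice cmd none (some (i:Int)))),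
                       some (String.ofList (PySem.Chars.strip (PySem.List.slice cmd (some ((i:Int)+2)) none))), true) := by
                  simp [pvB_pass1, pvB_pass2, hc'.1, hc'.2, h1]
                rw [hA, hB]
              · have h2 : ¬ (PySem.List.slice cmd (some (i:Int)) (some ((i:Int)+2)) = ['>', '>']) := by
                  rw [htake2]
                  intro hco
                  exact ht1 (by injection hco)
                have h1 : ¬ (PySem.List.slice cmd (some ((i:Int)+1)) (some ((i:Int)+2)) = ['>']) := by
                  rw [htake1]
                  exact ht1
                have hA : pvA_go cmd ('>'::rs) i q false d
                    = (String.ofList (PySem.Chars.strip (PySem.List.slice cmd none (some (i:Int)))),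
                       some (String.ofList (PySem.Chars.strip (PySem.List.slice cmd (some ((i:Int)+1)) none))), false) := by
                  simp [pvA_go, hc'.1, hc'.2, h2]
                have hB : pvB_pass2 cmd ((pvB_pass1 ('>'::rs) q false d).zip ('>'::rs)) i
                    = (String.ofList (PySem.Chars.strip (PySem.List.slice cmd none (some (i:Int)))),
                       some (String.ofList (PySem.Chars.strip (PySem.List.slice cmd (some ((i:Int)+1)) none))), false) := by
                  simp [pvB_pass1, pvB_pass2, hc'.1, hc'.2, h1]
                rw [hA, hB]
            · have h2 : ¬ (PySem.List.slice cmd (some (i:Int)) (some ((i:Int)+2)) = ['>', '>']) := by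
                rw [htake2]
                intro hco
                exact hgt (by injection hco)
              have hA : pvA_go cmd (ch::rs) i q false d
                  = pvA_go cmd rs (i+1) q false (if ch = '(' then d + 1 else if ch = ')' ∧ d > 0 then d - 1 else d) := by
                simp [pvA_go, hb, hq, hc, hgt, h2]
              have hB : pvB_pass2 cmd ((pvB_pass1 (ch::rs) q false d).zip (ch::rs)) i
                  = pvB_pass2 cmd ((pvB_pass1 rs q false (if ch = '(' then d + 1 else if ch = ')' ∧ d > 0 then d - 1 else d)).zip rs) (i+1) := by
                simp [pvB_pass1, pvB_pass2, hb, hq, hc, hgt]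
              rw [hA, hB]
              exact ih (i+1) q false _ hdrop
          · have hA : pvA_go cmd (ch::rs) i q false d
                = pvA_go cmd rs (i+1) q false (if ch = '(' then d + 1 else if ch = ')' ∧ d > 0 then d - 1 else d) := by
              simp [pvA_go, hb, hq, hc]
            have hB : pvB_pass2 cmd ((pvB_pass1 (ch::rs) q false d).zip (ch::rs)) i
                = pvB_pass2 cmd ((pvB_pass1 rs q false (if ch = '(' then d + 1 else if ch = ')' ∧ d > 0 then d - 1 else d)).zip rs) (i+1) := by
              simp [pvB_pass1, pvB_pass2, hb, hq, hc]
            rw [hA, hB]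
            exact ih (i+1) q false _ hdrop

-- ===== VERDICT (by name: the statement is the Claim_ definition above) =====
theorem parse_redirection_spec : Claim_equal_parse_redirection := by
  intro cmd _
  unfold Spec_parse_redirection parse_redirection parse_redirection_alt
  exact pv_go_eq cmd.toList cmd.toList 0 none false 0 (by simp)
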